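-- pv_equiv track=rewrite | github.com/elgerytme/Pynomaly | scripts/analyze_api_coverage.py | analyze_coverage_status
-- ===== SOURCE A (Python) =====
-- from typing import Dict, List, Set, Tuple
--
-- def analyze_coverage_status(endpoints: Dict, test_coverage: Dict) -> Dict[str, str]:
--     """Analyze coverage status for each endpoint."""
--     status = {}
--
--     # Create a mapping of endpoint paths to test coverage
--     tested_endpoints = set()
--     for test_file, tests in test_coverage.items():
--         for test in tests:
--             if any(method in test for method in ['GET', 'POST', 'PUT', 'PATCH', 'DELETE']):
--                 tested_endpoints.add(test)
--
--     # Check coverage for each endpoint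
--     for router_name, router_endpoints in endpoints.items():
--         for endpoint in router_endpoints:
--             method = endpoint.get('method', 'GET')
--             path = endpoint.get('path', '')
--
--             endpoint_key = f"{method} {path}"
--
--             # Determine coverage status
--             if endpoint_key in tested_endpoints:
--                 status[endpoint_key] = 'C'  # Covered
--             elif any(path in test_key for test_key in tested_endpoints):
--                 status[endpoint_key] = 'P'  # Partial
--             else:
--                 status[endpoint_key] = 'M'  # Missing
--
--     return status
-- ===== SOURCE B (Python) =====
-- _METHODS = ('GET', 'POST', 'PUT', 'PATCH', 'DELETE')
--
-- def analyze_coverage_status(endpoints, test_coverage):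
--     """Analyze coverage status for each endpoint."""
--     # Inverted loop nesting: no tested-key set is built.  First list the
--     # endpoint rows once; then stream every qualifying test over a per-row
--     # verdict array, upgrading M -> P -> C; finally assemble the dict.
--     rows = [(f"{ep.get('method', 'GET')} {ep.get('path', '')}", ep.get('path', ''))
--             for eps in endpoints.values() for ep in eps]
--     verdicts = ['M'] * len(rows)
--     for tests in test_coverage.values():
--         for t in tests:
--             if any(m in t for m in _METHODS):
--                 verdicts = ['C' if t == key
--                             else 'P' if v == 'M' and path in t
--                             else v
--                             for (key, path), v in zip(rows, verdicts)]
--     return {key: v for (key, _), v in zip(rows, verdicts)}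
-- ===== Notes on version B (the rewrite author's own statement) =====
-- stated objective: alternative
-- what changed: B inverts the loop nesting: it never builds A's tested-endpoint set; it lists the endpoint rows once, then streams each qualifying test over a per-row verdict array, upgrading M->P->C in place, and assembles the result dict from the final verdicts.
import Mathlib
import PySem

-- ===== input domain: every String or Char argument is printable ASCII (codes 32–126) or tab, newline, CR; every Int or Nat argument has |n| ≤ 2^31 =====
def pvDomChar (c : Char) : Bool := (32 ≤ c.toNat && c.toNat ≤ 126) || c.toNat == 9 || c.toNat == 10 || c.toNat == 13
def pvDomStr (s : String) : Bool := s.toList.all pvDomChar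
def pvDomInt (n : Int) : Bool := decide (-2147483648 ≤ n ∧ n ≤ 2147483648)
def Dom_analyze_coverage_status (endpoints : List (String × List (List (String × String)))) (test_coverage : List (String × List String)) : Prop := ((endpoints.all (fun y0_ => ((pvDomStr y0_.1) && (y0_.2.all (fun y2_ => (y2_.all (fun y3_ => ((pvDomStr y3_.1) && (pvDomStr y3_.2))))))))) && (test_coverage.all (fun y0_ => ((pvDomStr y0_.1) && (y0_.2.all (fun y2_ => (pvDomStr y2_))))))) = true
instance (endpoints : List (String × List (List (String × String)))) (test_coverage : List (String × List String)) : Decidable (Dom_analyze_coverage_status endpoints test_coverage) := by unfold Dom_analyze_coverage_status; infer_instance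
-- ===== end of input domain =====

-- B inverts A's loop nesting: no tested-key set is built; the endpoint rows are listed once and
-- each qualifying test streams over a per-row verdict array, upgrading M->P->C in place;
-- objective: alternative (same worst-case cost, different traversal and state).

-- shared port of the Python `.get(k, dflt)` on an endpoint dict (lookup = first match)
def pvGetStr (d : List (String × String)) (k dflt : String) : String :=
  match d.find? (fun p => p.1 == k) with
  | some p => p.2
  | none => dflt

-- the shared test `any(m in t for m in ['GET','POST','PUT','PATCH','DELETE'])`
def pvQual (t : String) : Bool :=
  ["GET", "POST", "PUT", "PATCH", "DELETE"].any (fun m => PySem.Str.isIn m t)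

-- ===== PORT A =====
def analyze_coverage_status (endpoints : List (String × List (List (String × String)))) (test_coverage : List (String × List String)) : List (String × String) :=
  -- tested_endpoints: loop over test_coverage.items(), conditional set.add
  let tested : PySem.Set String :=
    test_coverage.foldl (fun acc fileTests =>
      fileTests.2.foldl (fun acc test =>
        if pvQual test then PySem.Set.add acc test else acc)
        acc)
      PySem.Set.empty
  let status : PySem.Dict String String :=
    endpoints.foldl (fun st router =>
      router.2.foldl (fun st ep =>
        let method := pvGetStr ep "method" "GET"
        let path := pvGetStr ep "path" ""
        let key := method ++ " " ++ path
        if PySem.Set.contains tested key then st.insert key "C"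
        else if List.any tested (fun tk => PySem.Str.isIn path tk) then st.insert key "P"
        else st.insert key "M")
        st)
      PySem.Dict.empty
  status.items

-- ===== PORT B =====
-- the per-row verdict update B's list comprehension applies for one test t
def pvRStep (t : String) (r : String × String) (v : String) : String :=
  if t == r.1 then "C"
  else if v == "M" && PySem.Str.isIn r.2 t then "P"
  else v

def analyze_coverage_status_alt (endpoints : List (String × List (List (String × String)))) (test_coverage : List (String × List String)) : List (String × String) :=
  let rows : List (String × String) :=
    endpoints.flatMap (fun r => r.2.map (fun ep =>
      (pvGetStr ep "method" "GET" ++ " " ++ pvGetStr ep "path" "", pvGetStr ep "path" "")))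
  let verdicts : List String :=
    test_coverage.foldl (fun vs p =>
      p.2.foldl (fun vs t =>
        if pvQual t then List.zipWith (pvRStep t) rows vs else vs)
        vs)
      (List.replicate rows.length "M")
  ((rows.zip verdicts).foldl (fun st rv => st.insert rv.1.1 rv.2) PySem.Dict.empty).items

-- ===== PRECONDITION & SPEC =====
def Spec_analyze_coverage_status (endpoints : List (String × List (List (String × String)))) (test_coverage : List (String × List String)) (out : List (String × String)) : Prop := out = analyze_coverage_status_alt endpoints test_coverage
instance (endpoints : List (String × List (List (String × String)))) (test_coverage : List (String × List String)) (out : List (String × String)) : Decidable (Spec_analyze_coverage_status endpoints test_coverage out) := by unfold Spec_analyze_coverage_status; infer_instance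

-- ===== CLAIM (what is proved, stated in full; the proofs are below) =====
def Claim_equal_analyze_coverage_status : Prop := ∀ (endpoints : List (String × List (List (String × String)))) (test_coverage : List (String × List String)), Dom_analyze_coverage_status endpoints test_coverage → Spec_analyze_coverage_status endpoints test_coverage (analyze_coverage_status endpoints test_coverage)

-- ===== LEMMAS AND PROOFS =====

-- the qualifying tests, flattened, in order (shared reference point of both proofs)
def pvQT (test_coverage : List (String × List String)) : List String :=
  (test_coverage.flatMap (fun p => p.2)).filter pvQual

-- the endpoint rows (key, path) in traversal order
def pvRows (endpoints : List (String × List (List (String × String)))) : List (String × String) :=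
  endpoints.flatMap (fun r => r.2.map (fun ep =>
    (pvGetStr ep "method" "GET" ++ " " ++ pvGetStr ep "path" "", pvGetStr ep "path" "")))

-- the common per-endpoint verdict both programs compute
def pvVerdict (qt : List String) (key path : String) : String :=
  if qt.contains key then "C"
  else if qt.any (fun t => PySem.Str.isIn path t) then "P"
  else "M"

-- A's conditional set-add double loop builds set(filtered flattened tests)
theorem tested_eq (test_coverage : List (String × List String)) :
    (test_coverage.foldl (fun acc fileTests =>
        fileTests.2.foldl (fun acc test =>
          if pvQual test then PySem.Set.add acc test else acc)
        acc)
      PySem.Set.empty : PySem.Set String)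
    = PySem.Set.ofList (pvQT test_coverage) := by
  rw [pvQT, PySem.Set.ofList_eq_foldl, List.foldl_filter, List.foldl_flatMap]
  rfl

-- membership tests see through set() construction
theorem contains_ofList (qt : List String) (k : String) :
    List.contains (PySem.Set.ofList qt) k = List.contains qt k := by
  rw [Bool.eq_iff_iff]
  simp [PySem.Set.mem_ofList]

theorem any_ofList (qt : List String) (p : String → Bool) :
    (PySem.Set.ofList qt).any p = qt.any p := by
  rw [Bool.eq_iff_iff]
  simp [List.any_eq_true, PySem.Set.mem_ofList]

-- a row at verdict "C" never changes
theorem rowC (r : String × String) (qt : List String) :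
    qt.foldl (fun v t => pvRStep t r v) "C" = "C" := by
  induction qt with
  | nil => rfl
  | cons t qt ih =>
    have h : pvRStep t r "C" = "C" := by
      simp [pvRStep, (show (("C" : String) == "M") = false from rfl)]
    simp only [List.foldl_cons, h, ih]

-- a row at verdict "P" only upgrades on an exact key hit
theorem rowP (r : String × String) (qt : List String) :
    qt.foldl (fun v t => pvRStep t r v) "P"
      = if qt.contains r.1 then "C" else "P" := by
  induction qt with
  | nil => rfl
  | cons t qt ih =>
    simp only [List.foldl_cons]
    by_cases h : t == r.1
    · have he : r.1 = t := (beq_iff_eq.mp h).symm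
      have hstep : pvRStep t r "P" = "C" := by simp [pvRStep, h]
      rw [hstep, rowC]
      simp [he]
    · have hne : ¬ r.1 = t := fun e => h (by simp [e])
      have hstep : pvRStep t r "P" = "P" := by simp [pvRStep, h]
      rw [hstep, ih]
      simp [hne]

-- the full per-row fold computes the common verdict
theorem rowM (r : String × String) (qt : List String) :
    qt.foldl (fun v t => pvRStep t r v) "M" = pvVerdict qt r.1 r.2 := by
  induction qt with
  | nil => rfl
  | cons t qt ih =>
    simp only [List.foldl_cons]
    by_cases h : t == r.1
    · have he : r.1 = t := (beq_iff_eq.mp h).symm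
      have hstep : pvRStep t r "M" = "C" := by simp [pvRStep, h]
      rw [hstep, rowC]
      simp [pvVerdict, he]
    · have hne : ¬ r.1 = t := fun e => h (by simp [e])
      by_cases hin : PySem.Str.isIn r.2 t
      · have hin2 : PySem.Chars.isIn r.2.toList t.toList = true := by simpa using hin
        have hstep : pvRStep t r "M" = "P" := by simp [pvRStep, h, hin2]
        rw [hstep, rowP]
        simp [pvVerdict, List.any_cons, hne, hin2]
      · have hin2 : PySem.Chars.isIn r.2.toList t.toList = false := by simpa using hin
        have hstep : pvRStep t r "M" = "M" := by simp [pvRStep, h, hin2]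
        rw [hstep, ih]
        simp [pvVerdict, List.any_cons, hne, hin2]

-- pointwise zipWith against a mapped copy of the same list is a map
theorem zipWith_map_self {α β : Type} (h : α → β → β) (f : α → β) (l : List α) :
    List.zipWith h l (l.map f) = l.map (fun x => h x (f x)) := by
  induction l with
  | nil => rfl
  | cons x l ih => simp [ih]

-- streaming the tests over a per-row state array is the per-row fold, row by row
theorem verdicts_fold (rows : List (String × String)) (qt : List String)
    (f : String × String → String) :
    qt.foldl (fun vs t => List.zipWith (pvRStep t) rows vs) (rows.map f)
      = rows.map (fun r => qt.foldl (fun v t => pvRStep t r v) (f r)) := by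
  induction qt generalizing f with
  | nil => rfl
  | cons t qt ih =>
    simp only [List.foldl_cons, zipWith_map_self, ih (fun r => pvRStep t r (f r))]

-- inserting the zipped verdicts is inserting per row
theorem foldl_insert_zip_map (rows : List (String × String)) (g : String × String → String)
    (st : PySem.Dict String String) :
    (rows.zip (rows.map g)).foldl (fun st rv => st.insert rv.1.1 rv.2) st
      = rows.foldl (fun st r => st.insert r.1 (g r)) st := by
  induction rows generalizing st with
  | nil => rfl
  | cons r rows ih => simp only [List.map_cons, List.zip_cons_cons, List.foldl_cons, ih]

-- B computes the dict of per-row common verdicts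
theorem B_eq (endpoints : List (String × List (List (String × String)))) (test_coverage : List (String × List String)) :
    analyze_coverage_status_alt endpoints test_coverage
      = ((pvRows endpoints).foldl (fun st r =>
            st.insert r.1 (pvVerdict (pvQT test_coverage) r.1 r.2)) PySem.Dict.empty).items := by
  have hR : (endpoints.flatMap (fun r => r.2.map (fun ep =>
      (pvGetStr ep "method" "GET" ++ " " ++ pvGetStr ep "path" "", pvGetStr ep "path" ""))))
      = pvRows endpoints := rfl
  unfold analyze_coverage_status_alt
  simp only []
  rw [hR]
  rw [show List.replicate (pvRows endpoints).length ("M" : String)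
        = (pvRows endpoints).map (fun _ => "M") from List.map_const'.symm]
  rw [← List.foldl_flatMap, PySem.List.foldl_if_eq_foldl_filter, ← pvQT,
    verdicts_fold (pvRows endpoints) (pvQT test_coverage) (fun _ => "M")]
  rw [List.map_congr_left (fun r _ => rowM r (pvQT test_coverage))]
  rw [foldl_insert_zip_map]

-- A computes the same dict of per-row common verdicts
theorem A_eq (endpoints : List (String × List (List (String × String)))) (test_coverage : List (String × List String)) :
    analyze_coverage_status endpoints test_coverage
      = ((pvRows endpoints).foldl (fun st r =>
            st.insert r.1 (pvVerdict (pvQT test_coverage) r.1 r.2)) PySem.Dict.empty).items := by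
  unfold analyze_coverage_status
  simp only []
  rw [tested_eq, pvRows, List.foldl_flatMap]
  congr 1
  apply PySem.List.foldl_congr_mem
  intro st router _
  rw [List.foldl_map]
  apply PySem.List.foldl_congr_mem
  intro st' ep _
  simp only [PySem.Set.contains_eq_listContains, contains_ofList, any_ofList, pvVerdict]
  split_ifs <;> rfl

-- ===== VERDICT (by name: the statement is the Claim_ definition above) =====
theorem analyze_coverage_status_spec : Claim_equal_analyze_coverage_status := by
  intro endpoints test_coverage _
  unfold Spec_analyze_coverage_status
  rw [A_eq, B_eq]
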